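-- pv_equiv track=rewrite | github.com/maxymkuz/cs_first_semester | lection7_lists/labka#7.py | sieve_flavius0
-- ===== SOURCE A (Python) =====
-- def sieve_flavius0(n):
--     odd_list = [i for i in range(1, n) if i % 2 == 1]
--     third_list = []
--     res = []
--     for i, j in enumerate(odd_list):
--         if ((i+1) % 3) != 0:
--             third_list.append(j)
--     for i, j in enumerate(third_list):
--         if ((i+1) % 7) != 0:
--             res.append(j)
--     return res
-- ===== SOURCE B (Python) =====
-- def sieve_flavius0(n):
--     c1 = 0
--     c2 = 0
--     res = []
--     for i in range(1, n):
--         if i % 2 == 1: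
--             c1 += 1
--             if c1 % 3 != 0:
--                 c2 += 1
--                 if c2 % 7 != 0:
--                     res.append(i)
--     return res
-- ===== Notes on version B (the rewrite author's own statement) =====
-- stated objective: simpler
-- what changed: Replaced the three-pass pipeline (build odd_list, filter every 3rd into third_list, filter every 7th into res) with a single fused loop over range(1,n) carrying two survivor counters and no intermediate lists.
import Mathlib
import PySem

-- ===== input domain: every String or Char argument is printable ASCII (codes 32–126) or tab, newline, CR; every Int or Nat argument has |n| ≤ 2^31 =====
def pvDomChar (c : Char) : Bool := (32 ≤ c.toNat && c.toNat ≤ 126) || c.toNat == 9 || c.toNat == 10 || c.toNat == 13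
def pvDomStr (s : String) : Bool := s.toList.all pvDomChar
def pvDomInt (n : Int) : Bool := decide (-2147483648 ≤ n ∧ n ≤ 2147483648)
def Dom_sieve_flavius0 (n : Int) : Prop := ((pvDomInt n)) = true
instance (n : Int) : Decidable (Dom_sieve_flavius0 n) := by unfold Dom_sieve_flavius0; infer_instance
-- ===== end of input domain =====

-- B fuses A's three passes (odd list, every-3rd filter, every-7th filter) into one
-- counter-carrying loop with no intermediate lists; objective: simpler (one pass, shorter).

-- ===== PORT A =====
def sieve_flavius0 (n : Int) : List Int :=
  let odd_list := (PySem.List.pyRange 1 n 1).filter (fun i => PySem.Int.mod i 2 == 1)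
  let third_list := (PySem.List.enumerate odd_list 0).foldl
    (fun acc (p : Int × Int) => if PySem.Int.mod (p.1 + 1) 3 ≠ 0 then acc ++ [p.2] else acc) []
  let res := (PySem.List.enumerate third_list 0).foldl
    (fun acc (p : Int × Int) => if PySem.Int.mod (p.1 + 1) 7 ≠ 0 then acc ++ [p.2] else acc) []
  res

-- ===== PORT B =====
def sieve_flavius0_alt (n : Int) : List Int :=
  ((PySem.List.pyRange 1 n 1).foldl
    (fun (st : Int × Int × List Int) i =>
      if PySem.Int.mod i 2 == 1 then
        let c1 := st.1 + 1
        if PySem.Int.mod c1 3 ≠ 0 then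
          let c2 := st.2.1 + 1
          if PySem.Int.mod c2 7 ≠ 0 then (c1, c2, st.2.2 ++ [i]) else (c1, c2, st.2.2)
        else (c1, st.2.1, st.2.2)
      else st)
    ((0 : Int), (0 : Int), ([] : List Int))).2.2

-- ===== PRECONDITION & SPEC =====
def Spec_sieve_flavius0 (n : Int) (out : List Int) : Prop := out = sieve_flavius0_alt n
instance (n : Int) (out : List Int) : Decidable (Spec_sieve_flavius0 n out) := by unfold Spec_sieve_flavius0; infer_instance

-- ===== CLAIM (what is proved, stated in full; the proofs are below) =====
def Claim_equal_sieve_flavius0 : Prop := ∀ (n : Int), Dom_sieve_flavius0 n → Spec_sieve_flavius0 n (sieve_flavius0 n)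

-- ===== LEMMAS AND PROOFS =====

-- keep m c xs: the elements of xs whose 1-based position (counted from c+1) is not a multiple of m
def pvKeep (m : Int) : Int → List Int → List Int
  | _, [] => []
  | c, j :: t => if PySem.Int.mod (c + 1) m ≠ 0 then j :: pvKeep m (c + 1) t else pvKeep m (c + 1) t

theorem pvEnumFold (m : Int) : ∀ (xs : List Int) (s : Int) (acc : List Int),
    (PySem.List.enumerate xs s).foldl
      (fun acc (p : Int × Int) => if PySem.Int.mod (p.1 + 1) m ≠ 0 then acc ++ [p.2] else acc) acc
      = acc ++ pvKeep m s xs := by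
  intro xs
  induction xs with
  | nil => intro s acc; simp [PySem.List.enumerate_nil, pvKeep]
  | cons x t ih =>
    intro s acc
    rw [PySem.List.enumerate_cons, List.foldl_cons, ih]
    simp only [pvKeep]
    split_ifs with h <;> simp

-- the fused pipeline
def pvPipe : Int → Int → List Int → List Int
  | _, _, [] => []
  | c1, c2, x :: t =>
    if PySem.Int.mod x 2 == 1 then
      if PySem.Int.mod (c1 + 1) 3 ≠ 0 then
        if PySem.Int.mod (c2 + 1) 7 ≠ 0 then x :: pvPipe (c1 + 1) (c2 + 1) t
        else pvPipe (c1 + 1) (c2 + 1) t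
      else pvPipe (c1 + 1) c2 t
    else pvPipe c1 c2 t

theorem pvKeep_keep : ∀ (xs : List Int) (c1 c2 : Int),
    pvKeep 7 c2 (pvKeep 3 c1 (xs.filter (fun i => PySem.Int.mod i 2 == 1))) = pvPipe c1 c2 xs := by
  intro xs
  induction xs with
  | nil => intro c1 c2; simp [pvPipe, pvKeep]
  | cons x t ih =>
    intro c1 c2
    simp only [pvPipe, List.filter_cons]
    split_ifs with h2 h3 h7 <;> simp_all [pvKeep]

-- final counters of B's fold
def pvCts : Int → Int → List Int → Int × Int
  | c1, c2, [] => (c1, c2)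
  | c1, c2, x :: t =>
    if PySem.Int.mod x 2 == 1 then
      if PySem.Int.mod (c1 + 1) 3 ≠ 0 then pvCts (c1 + 1) (c2 + 1) t
      else pvCts (c1 + 1) c2 t
    else pvCts c1 c2 t

theorem pvFoldB : ∀ (xs : List Int) (c1 c2 : Int) (acc : List Int),
    xs.foldl
      (fun (st : Int × Int × List Int) i =>
        if PySem.Int.mod i 2 == 1 then
          let c1 := st.1 + 1
          if PySem.Int.mod c1 3 ≠ 0 then
            let c2 := st.2.1 + 1
            if PySem.Int.mod c2 7 ≠ 0 then (c1, c2, st.2.2 ++ [i]) else (c1, c2, st.2.2)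
          else (c1, st.2.1, st.2.2)
        else st)
      (c1, c2, acc)
      = ((pvCts c1 c2 xs).1, (pvCts c1 c2 xs).2, acc ++ pvPipe c1 c2 xs) := by
  intro xs
  induction xs with
  | nil => intro c1 c2 acc; simp [pvCts, pvPipe]
  | cons x t ih =>
    intro c1 c2 acc
    simp only [List.foldl_cons, pvCts, pvPipe]
    split_ifs with h2 h3 h7 <;> simp_all

-- ===== VERDICT (by name: the statement is the Claim_ definition above) =====
theorem sieve_flavius0_spec : Claim_equal_sieve_flavius0 := by
  intro n _
  unfold Spec_sieve_flavius0
  simp only [sieve_flavius0, sieve_flavius0_alt, pvEnumFold, pvFoldB]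
  simp only [List.nil_append]
  exact pvKeep_keep _ 0 0
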